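-- pv_equiv track=rewrite | github.com/RbBtSn0w/gh-address-cr | src/gh_address_cr/github/diagnostics.py | _stderr_category
-- ===== SOURCE A (Python) =====
-- AUTH_MARKERS = (
--     "authentication",
--     "gh auth login",
--     "bad credentials",
--     "not logged into",
--     "not logged in",
--     "401",
-- )
--
-- NETWORK_MARKERS = (
--     "could not resolve host",
--     "failed to connect",
--     "error connecting",
--     "network is unreachable",
--     "temporary failure",
--     "connection reset",
--     "timeout",
--     "timed out",
-- )
--
-- SANDBOX_MARKERS = (
--     "operation not permitted",
--     "permission denied",
--     "sandbox",
--     "not permitted",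
-- )
--
-- ENVIRONMENT_MARKERS = (
--     "missing github cli",
--     "`gh` on path",
--     "executable file not found",
-- )
--
-- RATE_LIMIT_MARKERS = ("rate limit", "secondary rate")
--
-- NOT_FOUND_MARKERS = ("not found", "could not resolve to a node", "404")
--
-- API_MARKERS = ("graphql", "api")
--
-- def _stderr_category(text: str) -> str:
--     if any(marker in text for marker in AUTH_MARKERS):
--         return "auth"
--     if any(marker in text for marker in SANDBOX_MARKERS):
--         return "sandbox"
--     if any(marker in text for marker in ENVIRONMENT_MARKERS):
--         return "environment"
--     if any(marker in text for marker in NETWORK_MARKERS):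
--         return "network"
--     if any(marker in text for marker in RATE_LIMIT_MARKERS):
--         return "rate_limit"
--     if any(marker in text for marker in NOT_FOUND_MARKERS):
--         return "not_found"
--     if any(marker in text for marker in API_MARKERS):
--         return "api"
--     return "unknown"
-- ===== SOURCE B (Python) =====
-- # B: flatten all markers into one (marker, priority) list, take the MINIMUM
-- # matching priority in a single accumulator pass, then look the category up by index
-- # (instead of seven early-return branches).
-- AUTH_MARKERS = (
--     "authentication",
--     "gh auth login",
--     "bad credentials",
--     "not logged into",
--     "not logged in",
--     "401",
-- )
--
-- NETWORK_MARKERS = (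
--     "could not resolve host",
--     "failed to connect",
--     "error connecting",
--     "network is unreachable",
--     "temporary failure",
--     "connection reset",
--     "timeout",
--     "timed out",
-- )
--
-- SANDBOX_MARKERS = (
--     "operation not permitted",
--     "permission denied",
--     "sandbox",
--     "not permitted",
-- )
--
-- ENVIRONMENT_MARKERS = (
--     "missing github cli",
--     "`gh` on path",
--     "executable file not found",
-- )
--
-- RATE_LIMIT_MARKERS = ("rate limit", "secondary rate")
--
-- NOT_FOUND_MARKERS = ("not found", "could not resolve to a node", "404")
--
-- API_MARKERS = ("graphql", "api")
--
-- # Categories in A's CHECK order (priority 0 = highest).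
-- CATEGORIES = ("auth", "sandbox", "environment", "network",
--               "rate_limit", "not_found", "api")
--
-- FLAT_MARKERS = tuple(
--     (marker, priority)
--     for priority, markers in enumerate((AUTH_MARKERS, SANDBOX_MARKERS,
--                                         ENVIRONMENT_MARKERS, NETWORK_MARKERS,
--                                         RATE_LIMIT_MARKERS, NOT_FOUND_MARKERS,
--                                         API_MARKERS))
--     for marker in markers
-- )
--
-- def _stderr_category(text: str) -> str:
--     best = len(CATEGORIES)
--     for marker, priority in FLAT_MARKERS:
--         if marker in text:
--             best = min(best, priority)
--     return CATEGORIES[best] if best < len(CATEGORIES) else "unknown"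
-- ===== Notes on version B (the rewrite author's own statement) =====
-- stated objective: alternative
-- what changed: Instead of seven early-return if/any branches, B flattens all markers into one (marker, priority) list, computes the minimum matching priority in a single accumulator pass over all markers, and indexes into a category tuple (falling back to 'unknown').
import Mathlib
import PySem

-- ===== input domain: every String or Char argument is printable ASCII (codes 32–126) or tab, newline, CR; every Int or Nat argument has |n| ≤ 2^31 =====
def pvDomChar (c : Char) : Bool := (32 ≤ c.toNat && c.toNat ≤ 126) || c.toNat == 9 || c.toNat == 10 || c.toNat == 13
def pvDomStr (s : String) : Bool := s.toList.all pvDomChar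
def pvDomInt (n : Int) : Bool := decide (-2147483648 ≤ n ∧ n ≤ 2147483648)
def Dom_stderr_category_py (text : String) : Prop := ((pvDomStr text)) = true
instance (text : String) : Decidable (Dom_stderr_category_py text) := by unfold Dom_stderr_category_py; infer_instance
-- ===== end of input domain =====

-- B replaces seven early-return if/any branches by a single minimum-priority accumulator
-- pass over one flattened (marker, priority) list plus an index lookup (alternative; same cost).

-- ===== PORT A =====
def pvAuthMarkers : List String :=
  ["authentication", "gh auth login", "bad credentials", "not logged into", "not logged in", "401"]
def pvNetworkMarkers : List String :=
  ["could not resolve host", "failed to connect", "error connecting", "network is unreachable",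
   "temporary failure", "connection reset", "timeout", "timed out"]
def pvSandboxMarkers : List String :=
  ["operation not permitted", "permission denied", "sandbox", "not permitted"]
def pvEnvironmentMarkers : List String :=
  ["missing github cli", "`gh` on path", "executable file not found"]
def pvRateLimitMarkers : List String := ["rate limit", "secondary rate"]
def pvNotFoundMarkers : List String := ["not found", "could not resolve to a node", "404"]
def pvApiMarkers : List String := ["graphql", "api"]

def stderr_category_py (text : String) : String :=
  if pvAuthMarkers.any (fun marker => PySem.Str.isIn marker text) then "auth"
  else if pvSandboxMarkers.any (fun marker => PySem.Str.isIn marker text) then "sandbox"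
  else if pvEnvironmentMarkers.any (fun marker => PySem.Str.isIn marker text) then "environment"
  else if pvNetworkMarkers.any (fun marker => PySem.Str.isIn marker text) then "network"
  else if pvRateLimitMarkers.any (fun marker => PySem.Str.isIn marker text) then "rate_limit"
  else if pvNotFoundMarkers.any (fun marker => PySem.Str.isIn marker text) then "not_found"
  else if pvApiMarkers.any (fun marker => PySem.Str.isIn marker text) then "api"
  else "unknown"

-- ===== PORT B =====
-- categories in A's check order; priority 0 is highest
def pvCategories : List String :=
  ["auth", "sandbox", "environment", "network", "rate_limit", "not_found", "api"]

-- flattened (marker, priority) list, built group by group as Source B's comprehension does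
def pvFlatMarkers : List (String × Nat) :=
  pvAuthMarkers.map (fun m => (m, 0)) ++ pvSandboxMarkers.map (fun m => (m, 1)) ++
  pvEnvironmentMarkers.map (fun m => (m, 2)) ++ pvNetworkMarkers.map (fun m => (m, 3)) ++
  pvRateLimitMarkers.map (fun m => (m, 4)) ++ pvNotFoundMarkers.map (fun m => (m, 5)) ++
  pvApiMarkers.map (fun m => (m, 6))

def stderr_category_py_alt (text : String) : String :=
  let best := pvFlatMarkers.foldl
    (fun best mp => if PySem.Str.isIn mp.1 text then min best mp.2 else best)
    pvCategories.length
  if best < pvCategories.length then pvCategories.getD best "unknown" else "unknown"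

-- ===== PRECONDITION & SPEC =====
def Spec_stderr_category_py (text : String) (out : String) : Prop := out = stderr_category_py_alt text
instance (text : String) (out : String) : Decidable (Spec_stderr_category_py text out) := by unfold Spec_stderr_category_py; infer_instance

-- ===== CLAIM (what is proved, stated in full; the proofs are below) =====
def Claim_equal_stderr_category_py : Prop := ∀ (text : String), Dom_stderr_category_py text → Spec_stderr_category_py text (stderr_category_py text)

-- ===== LEMMAS AND PROOFS =====

-- folding min-priority over one constant-priority group equals an 'any' test on the group
theorem pvFold_group (text : String) (k : Nat) (markers : List String) (acc : Nat) :
    (markers.map (fun m => (m, k))).foldl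
      (fun best mp => if PySem.Str.isIn mp.1 text then min best mp.2 else best) acc
    = if markers.any (fun m => PySem.Str.isIn m text) then min acc k else acc := by
  induction markers generalizing acc with
  | nil => simp
  | cons m ms ih =>
      simp only [List.map_cons, List.foldl_cons, List.any_cons]
      rw [ih]
      rcases Bool.dichotomy (PySem.Str.isIn m text) with h | h <;>
        rcases Bool.dichotomy (ms.any (fun m => PySem.Str.isIn m text)) with h2 | h2 <;>
        simp only [h, h2, Bool.true_or, Bool.false_or, Bool.or_false] <;>
        simp [Nat.min_assoc]

-- ===== VERDICT (by name: the statement is the Claim_ definition above) =====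
set_option maxHeartbeats 4000000 in
theorem stderr_category_py_spec : Claim_equal_stderr_category_py := by
  intro text _
  unfold Spec_stderr_category_py stderr_category_py stderr_category_py_alt pvFlatMarkers
  simp only [List.foldl_append, pvFold_group]
  rcases Bool.dichotomy (pvAuthMarkers.any (fun m => PySem.Str.isIn m text)) with h1 | h1 <;>
  rcases Bool.dichotomy (pvSandboxMarkers.any (fun m => PySem.Str.isIn m text)) with h2 | h2 <;>
  rcases Bool.dichotomy (pvEnvironmentMarkers.any (fun m => PySem.Str.isIn m text)) with h3 | h3 <;>
  rcases Bool.dichotomy (pvNetworkMarkers.any (fun m => PySem.Str.isIn m text)) with h4 | h4 <;>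
  rcases Bool.dichotomy (pvRateLimitMarkers.any (fun m => PySem.Str.isIn m text)) with h5 | h5 <;>
  rcases Bool.dichotomy (pvNotFoundMarkers.any (fun m => PySem.Str.isIn m text)) with h6 | h6 <;>
  rcases Bool.dichotomy (pvApiMarkers.any (fun m => PySem.Str.isIn m text)) with h7 | h7 <;>
    simp only [h1, h2, h3, h4, h5, h6, h7] <;> decide
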